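-- pv_equiv track=rewrite | github.com/lindajoy/DSAs | 100_days_of_DSAs/blind_150/least_number_of_unique_integers.py | return_unique_elements_from_array
-- ===== SOURCE A (Python) =====
-- import heapq
-- from collections import Counter
--
-- def return_unique_elements_from_array(arr, k):
--     # Here we are creating a dictionary with a counter that counts every account;
--     # and store them in a dictionary
--     count_dict = Counter(arr)
--     # Converts the freq_list to a list
--     freq_list = list(count_dict.values())
--     # Here we are converting our list to a heap
--     heapq.heapify(freq_list)
--
--     # We use len of heap to help us output the end result
--     res = len(freq_list)
--
--     while k > 0 and freq_list:
--         # Pops out the smallest element.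
--         value = heapq.heappop(freq_list)
--         if k >= value:
--             k = k - value
--             res -= 1
--
--     return res
-- ===== SOURCE B (Python) =====
-- from collections import Counter
--
-- def return_unique_elements_from_array(arr, k):
--     # Counting-sort style: bucket the frequencies by value and consume whole
--     # buckets ascending, stopping once every group has been passed.
--     counts = Counter(arr)
--     n = len(arr)
--     bucket = Counter(counts.values())
--     removed = 0
--     left = len(counts)          # groups with frequency >= current c
--     for c in range(1, n + 1):
--         if k <= 0 or left == 0:
--             break
--         b = bucket[c]
--         left -= b
--         t = min(b, k // c)
--         removed += t
--         k -= t * c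
--     return len(counts) - removed
-- ===== Notes on version B (the rewrite author's own statement) =====
-- stated objective: faster
-- what changed: Replaces the heap of frequencies (heapify + repeated heappop) by a count-of-counts bucket table consumed in ascending frequency, taking each whole bucket at once with k // c.
import Mathlib
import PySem

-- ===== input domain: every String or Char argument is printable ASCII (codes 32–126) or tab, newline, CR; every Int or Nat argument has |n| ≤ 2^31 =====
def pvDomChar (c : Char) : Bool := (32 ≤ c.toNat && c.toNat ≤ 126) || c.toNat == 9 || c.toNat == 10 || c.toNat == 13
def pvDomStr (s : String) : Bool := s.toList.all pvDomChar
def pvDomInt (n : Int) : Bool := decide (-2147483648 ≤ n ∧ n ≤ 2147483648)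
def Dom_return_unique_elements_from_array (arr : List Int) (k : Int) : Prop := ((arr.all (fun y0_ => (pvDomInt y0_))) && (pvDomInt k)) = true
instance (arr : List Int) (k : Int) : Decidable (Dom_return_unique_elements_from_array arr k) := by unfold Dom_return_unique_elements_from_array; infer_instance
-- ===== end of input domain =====

-- B replaces A's heap of frequencies by a count-of-counts bucket table consumed
-- in ascending frequency (counting-sort greedy, no heap); measured faster by the
-- timing run; the return values are proved equal on every input.

-- ===== PORT A =====
-- Python's heap of Int frequencies: heappop returns and removes the smallest
-- element (equal Ints are indistinguishable, so the heap is exactly a multiset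
-- with pop-min; `erase` of the minimum is the removal).
def return_unique_elements_from_array_heapLoop (fl : List Int) (k : Int) (res : Int) : Int :=
  if k > 0 then
    match hm : PySem.List.min? fl (fun x => x) with
    | none => res                    -- freq_list empty: loop ends
    | some v =>
      if k ≥ v then
        return_unique_elements_from_array_heapLoop (fl.erase v) (k - v) (res - 1)
      else
        return_unique_elements_from_array_heapLoop (fl.erase v) k res
  else res
termination_by fl.length
decreasing_by
  all_goals
    have hv : v ∈ fl := PySem.List.min?_mem hm
    simp [List.length_erase_of_mem hv]
    exact List.length_pos_of_mem hv

def return_unique_elements_from_array (arr : List Int) (k : Int) : Int :=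
  let count_dict := PySem.Dict.counter arr
  let freq_list := count_dict.values
  let res : Int := freq_list.length
  return_unique_elements_from_array_heapLoop freq_list k res

-- ===== PORT B =====
def return_unique_elements_from_array_bucketLoop
    (bucket : PySem.Dict Int Int) (cs : List Int) (k removed left : Int) : Int :=
  match cs with
  | [] => removed
  | c :: rest =>
    if k ≤ 0 ∨ left = 0 then removed
    else
      let b := bucket.getD c 0
      let t := min b (PySem.Int.floordiv k c)
      return_unique_elements_from_array_bucketLoop bucket rest (k - t * c) (removed + t) (left - b)

def return_unique_elements_from_array_alt (arr : List Int) (k : Int) : Int :=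
  let counts := PySem.Dict.counter arr
  let n := arr.length
  let bucket := PySem.Dict.counter counts.values
  let removed := return_unique_elements_from_array_bucketLoop bucket
      (PySem.List.pyRange 1 ((n : Int) + 1) 1) k 0 (counts.size : Int)
  (counts.size : Int) - removed

-- ===== PRECONDITION & SPEC =====
def Spec_return_unique_elements_from_array (arr : List Int) (k : Int) (out : Int) : Prop := out = return_unique_elements_from_array_alt arr k
instance (arr : List Int) (k : Int) (out : Int) : Decidable (Spec_return_unique_elements_from_array arr k out) := by unfold Spec_return_unique_elements_from_array; infer_instance

-- ===== CLAIM (what is proved, stated in full; the proofs are below) =====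
def Claim_equal_return_unique_elements_from_array : Prop := ∀ (arr : List Int) (k : Int), Dom_return_unique_elements_from_array arr k → Spec_return_unique_elements_from_array arr k (return_unique_elements_from_array arr k)

-- ===== LEMMAS AND PROOFS =====

-- Reference greedy on the ascending frequency list: number of removed groups.
def pvG (l : List Int) (k : Int) : Int :=
  match l with
  | [] => 0
  | v :: r => if k > 0 then (if k ≥ v then 1 + pvG r (k - v) else pvG r k) else 0

theorem pvG_nonpos (l : List Int) (k : Int) (hk : ¬ k > 0) : pvG l k = 0 := by
  cases l <;> simp [pvG, hk]

-- sorting a nonempty list puts its minimum in front of the sorted remainder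
theorem pvSorted_cons_min (fl : List Int) (v : Int)
    (hm : PySem.List.min? fl (fun x => x) = some v) :
    PySem.List.sorted fl (fun x => x) = v :: PySem.List.sorted (fl.erase v) (fun x => x) := by
  apply PySem.List.sorted_id_eq_of_perm_of_pairwise
  · exact ((PySem.List.sorted_perm _ _ _).cons v).trans
      (List.perm_cons_erase (PySem.List.min?_mem hm)).symm
  · refine List.pairwise_cons.mpr ⟨?_, PySem.List.sorted_pairwise _ _⟩
    intro b hb
    exact PySem.List.min?_isMin hm b
      (List.mem_of_mem_erase ((PySem.List.mem_sorted _ _ _ _).mp hb))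

-- A's heap loop equals the greedy pvG on the sorted frequency list
theorem pvHeapLoop_eq (fl : List Int) (k res : Int) :
    return_unique_elements_from_array_heapLoop fl k res
      = res - pvG (PySem.List.sorted fl (fun x => x)) k := by
  fun_induction return_unique_elements_from_array_heapLoop fl k res with
  | case1 fl k res hk hm =>
    have hfl := (PySem.List.min?_eq_none_iff fl (fun x => x)).mp hm
    subst hfl
    simp [PySem.List.sorted, pvG]
  | case2 fl k res hk v hm htk ih =>
    rw [ih, pvSorted_cons_min fl v hm, pvG]
    simp only [if_pos hk, if_pos htk]
    ring
  | case3 fl k res hk v hm htk ih =>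
    rw [ih, pvSorted_cons_min fl v hm, pvG]
    simp only [if_pos hk, if_neg htk]
  | case4 fl k res hk =>
    rw [pvG_nonpos _ _ hk]
    ring

theorem pvFloordiv_sub (k c : Int) (hc : 0 < c) :
    PySem.Int.floordiv (k - c) c = PySem.Int.floordiv k c - 1 := by
  rw [PySem.Int.floordiv_eq_ediv_of_pos hc, PySem.Int.floordiv_eq_ediv_of_pos hc]
  have e : k - c = k + (-1) * c := by ring
  rw [e, Int.add_mul_ediv_right _ _ (by omega : c ≠ 0)]; ring

-- greedily consuming one block of m equal frequencies c
theorem pvG_replicate (m : Nat) (c : Int) (hc : 1 ≤ c) (rest : List Int) (k : Int) :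
    pvG (List.replicate m c ++ rest) k
      = (if 0 < k then min (m : Int) (PySem.Int.floordiv k c) else 0)
        + pvG rest (k - (if 0 < k then min (m : Int) (PySem.Int.floordiv k c) else 0) * c) := by
  induction m generalizing k with
  | zero =>
    by_cases hk : 0 < k
    · have h0 : 0 ≤ PySem.Int.floordiv k c := by
        rw [PySem.Int.floordiv_eq_ediv_of_pos (by omega)]
        exact Int.ediv_nonneg (by omega) (by omega)
      have hmin : min ((0:Nat) : Int) (PySem.Int.floordiv k c) = 0 := by
        simp only [Nat.cast_zero]; omega
      simp only [List.replicate_zero, List.nil_append, if_pos hk, hmin]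
      ring_nf
    · simp [hk, pvG_nonpos _ _ hk]
  | succ m ih =>
    rw [List.replicate_succ, List.cons_append]
    by_cases hk : 0 < k
    · by_cases hkc : k ≥ c
      · set t' := (if 0 < k - c then min (m : Int) (PySem.Int.floordiv (k - c) c) else 0) with hdt
        have hq1 : 1 ≤ PySem.Int.floordiv k c := by
          rw [PySem.Int.le_floordiv_iff_mul_le (by omega)]; omega
        have hqs : PySem.Int.floordiv (k - c) c = PySem.Int.floordiv k c - 1 :=
          pvFloordiv_sub k c (by omega)
        have ht : (if 0 < k then min ((m + 1 : Nat) : Int) (PySem.Int.floordiv k c) else 0)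
            = 1 + t' := by
          by_cases hk2 : 0 < k - c
          · rw [hdt, if_pos hk, if_pos hk2, hqs]; push_cast; omega
          · have hkc2 : k = c := by omega
            have hfd : PySem.Int.floordiv k c = 1 := by
              rw [hkc2, PySem.Int.floordiv_eq_ediv_of_pos (by omega),
                Int.ediv_self (by omega : c ≠ 0)]
            rw [hdt, if_pos hk, if_neg hk2, hfd]; push_cast; omega
        rw [pvG, if_pos hk, if_pos hkc, ih (k - c), ← hdt, ht]
        have harg : k - (1 + t') * c = k - c - t' * c := by ring
        rw [harg]; ring
      · have hq0 : PySem.Int.floordiv k c = 0 := by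
          rw [PySem.Int.floordiv_eq_ediv_of_pos (by omega)]
          exact Int.ediv_eq_zero_of_lt (by omega) (by omega)
        have h1 : (if 0 < k then min ((m + 1 : Nat) : Int) (PySem.Int.floordiv k c) else 0) = 0 := by
          rw [if_pos hk, hq0]; omega
        have h2 : (if 0 < k then min ((m : Nat) : Int) (PySem.Int.floordiv k c) else 0) = 0 := by
          rw [if_pos hk, hq0]; omega
        rw [pvG, if_pos hk, if_neg hkc, ih k, h1, h2]
    · rw [pvG_nonpos _ _ hk, if_neg hk]
      simp [pvG_nonpos _ _ hk]

-- sorting a list whose minimum is c: block of c's, then the sorted rest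
theorem pvSorted_blocks (fl : List Int) (c : Int) (hmin : ∀ v ∈ fl, c ≤ v) :
    PySem.List.sorted fl (fun x => x)
      = List.replicate (fl.count c) c
        ++ PySem.List.sorted (fl.filter (fun v => !(v == c))) (fun x => x) := by
  apply PySem.List.sorted_id_eq_of_perm_of_pairwise
  · refine (List.Perm.append ?_ (PySem.List.sorted_perm _ _ _)).trans
      (List.filter_append_perm (· == c) fl)
    rw [← List.filter_beq c]
  · rw [List.pairwise_append]
    refine ⟨List.pairwise_replicate.mpr (by simp), PySem.List.sorted_pairwise _ _, ?_⟩
    intro a ha b hb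
    rw [List.eq_of_mem_replicate ha]
    have hbfl : b ∈ fl := List.mem_of_mem_filter ((PySem.List.mem_sorted _ _ _ _).mp hb)
    exact hmin b hbfl

-- B's bucket loop over [c0, c0+N) equals the greedy pvG on the sorted list
theorem pvBucketLoop_eq (N : Nat) : ∀ (c0 : Int), 1 ≤ c0 →
    ∀ (fl : List Int) (bucket : PySem.Dict Int Int) (k removed left : Int),
    (∀ v ∈ fl, c0 ≤ v ∧ v < c0 + N) →
    (∀ c : Int, c0 ≤ c → bucket.getD c 0 = (fl.count c : Int)) →
    left = (fl.length : Int) →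
    return_unique_elements_from_array_bucketLoop bucket (PySem.List.pyRange c0 (c0 + N) 1) k removed left
      = removed + pvG (PySem.List.sorted fl (fun x => x)) k := by
  induction N with
  | zero =>
    intro c0 hc0 fl bucket k removed left hbound hb hleft
    have hfl : fl = [] := by
      cases fl with
      | nil => rfl
      | cons a t => exact absurd (hbound a (by simp)) (by push_cast; omega)
    have hr : PySem.List.pyRange c0 (c0 + (0:Nat)) 1 = [] := by
      simp [PySem.List.pyRange]
    rw [hr, hfl]
    simp [return_unique_elements_from_array_bucketLoop, PySem.List.sorted, pvG]
  | succ N ih =>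
    intro c0 hc0 fl bucket k removed left hbound hb hleft
    have hcast : c0 + ((N + 1 : Nat) : Int) = c0 + ((N : Int) + 1) := by push_cast; ring
    rw [hcast, PySem.List.pyRange_one_cons (by omega)]
    rw [return_unique_elements_from_array_bucketLoop]
    by_cases hstop : k ≤ 0 ∨ left = 0
    · rw [if_pos hstop]
      rcases hstop with hk | hl
      · rw [pvG_nonpos _ _ (by omega)]; ring
      · have hfl : fl = [] := List.eq_nil_of_length_eq_zero (by omega)
        rw [hfl]
        simp [PySem.List.sorted, pvG]
    · rw [if_neg hstop]
      push Not at hstop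
      obtain ⟨hk, hl⟩ := hstop
      have hbc : bucket.getD c0 0 = (fl.count c0 : Int) := hb c0 (le_refl c0)
      rw [pvSorted_blocks fl c0 (fun v hv => (hbound v hv).1)]
      rw [pvG_replicate (fl.count c0) c0 hc0]
      rw [if_pos (by omega : (0:Int) < k)]
      have hrng : c0 + ((N : Int) + 1) = (c0 + 1) + (N : Int) := by ring
      rw [hrng, ih (c0 + 1) (by omega) (fl.filter (fun v => !(v == c0))) bucket _ _ _ ?_ ?_ ?_]
      · rw [hbc]; ring
      · intro v hv
        have hvf := List.mem_filter.mp hv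
        have hvb := hbound v hvf.1
        have hvne : v ≠ c0 := by simpa using hvf.2
        push_cast at hvb ⊢; omega
      · intro c hc
        rw [hb c (by omega)]
        have hne : c ≠ c0 := by omega
        have hcnt : (fl.filter (fun v => !(v == c0))).count c = fl.count c := by
          simp [List.count_filter, hne]
        rw [hcnt]
      · rw [hbc, hleft]
        have hsplit : (fl.filter (fun v => (v == c0))).length
            + (fl.filter (fun v => !(v == c0))).length = fl.length :=
          (List.length_eq_length_filter_add (fun v => (v == c0))).symm
        have hcc : fl.count c0 = (fl.filter (fun v => (v == c0))).length :=
          List.count_eq_length_filter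
        omega

-- ===== VERDICT (by name: the statement is the Claim_ definition above) =====
theorem return_unique_elements_from_array_spec : Claim_equal_return_unique_elements_from_array := by
  unfold Claim_equal_return_unique_elements_from_array Spec_return_unique_elements_from_array
  intro arr k _
  unfold return_unique_elements_from_array return_unique_elements_from_array_alt
  simp only []
  set fl := (PySem.Dict.counter arr).values with hfl
  have hvals : fl = (PySem.Set.ofList arr).map (fun x => ((arr.count x : Nat) : Int)) := by
    rw [hfl]
    simp [PySem.Dict.values, PySem.Dict.items_counter]
  have hbound : ∀ v ∈ fl, (1:Int) ≤ v ∧ v < 1 + (arr.length : Int) := by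
    rw [hvals]; intro v hv
    simp only [List.mem_map] at hv
    obtain ⟨x, hx, rfl⟩ := hv
    have hmem : x ∈ arr := (PySem.Set.mem_ofList arr x).mp hx
    have h1 : 0 < arr.count x := List.count_pos_iff.mpr hmem
    have h2 : arr.count x ≤ arr.length := List.count_le_length
    omega
  have hA := pvHeapLoop_eq fl k (fl.length : Int)
  have hsize : ((PySem.Dict.counter arr).size : Int) = (fl.length : Int) := by
    rw [hfl]; simp [PySem.Dict.size, PySem.Dict.values]
  have hB := pvBucketLoop_eq arr.length 1 (le_refl 1) fl (PySem.Dict.counter fl) k 0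
      ((PySem.Dict.counter arr).size : Int)
      hbound (fun c _ => PySem.Dict.getD_counter fl c) hsize
  rw [hA, hsize]
  rw [show ((arr.length : Int) + 1) = 1 + (arr.length : Nat) by ring] at *
  rw [hsize] at hB
  rw [hB]; ring
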